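-- pv_equiv track=rewrite | github.com/smileostrich/algorithm-practice | problemSolving/company/kakao/2019/오픈채팅방.py | solution
-- ===== SOURCE A (Python) =====
-- def solution(record):
--     dic_user = {}
--     li_move = []
--     for s in record:
--         if s[0] == 'E':
--             op,uid,name = s.split()
--             dic_user[uid] = name
--             li_move.append((True,uid))
--         elif s[0] == 'L':
--             op, uid = s.split()
--             li_move.append((False, uid))
--         elif s[0] == 'C':
--             op, uid, name = s.split()
--             dic_user[uid] = name
--     result = []
--     for o,u in li_move:
--         if o:
--             result.append(f'{dic_user[u]}님이 들어왔습니다.')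
--         else:
--             result.append(f'{dic_user[u]}님이 나갔습니다.')
--     return result
-- ===== SOURCE B (Python) =====
-- def solution(record):
--     # Group events by user: each user's entry holds their final name and the
--     # output slots of their enter/leave events; then scatter messages into slots.
--     per_user = {}
--     nslots = 0
--     for s in record:
--         if s[0] not in 'ELC':
--             continue
--         parts = s.split()
--         ev = per_user.setdefault(parts[1], [None, []])
--         if s[0] in 'EC':
--             ev[0] = parts[2]
--         if s[0] == 'E':
--             ev[1].append((nslots, '님이 들어왔습니다.'))
--             nslots += 1
--         elif s[0] == 'L':
--             ev[1].append((nslots, '님이 나갔습니다.'))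
--             nslots += 1
--     out = [None] * nslots
--     for name, evs in per_user.values():
--         for slot, suffix in evs:
--             out[slot] = name + suffix
--     return out
-- ===== Notes on version B (the rewrite author's own statement) =====
-- stated objective: alternative
-- what changed: B replaces A's sequential replay of an event list against a global name map by a group-by-user algorithm: one pass groups each user's final name together with the output slots of that user's enter/leave events, then the messages are scattered per user into a preallocated output list by slot index.
import Mathlib
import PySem

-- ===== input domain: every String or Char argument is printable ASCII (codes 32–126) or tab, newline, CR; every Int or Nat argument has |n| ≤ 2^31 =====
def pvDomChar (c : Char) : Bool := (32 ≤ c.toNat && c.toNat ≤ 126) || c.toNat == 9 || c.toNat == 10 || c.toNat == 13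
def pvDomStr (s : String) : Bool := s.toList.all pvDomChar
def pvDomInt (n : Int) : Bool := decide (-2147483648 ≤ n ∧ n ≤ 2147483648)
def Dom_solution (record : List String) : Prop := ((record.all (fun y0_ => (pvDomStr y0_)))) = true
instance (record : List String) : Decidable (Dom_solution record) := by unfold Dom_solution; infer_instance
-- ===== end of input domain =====

-- B is a group-by-user algorithm: per user it stores the final name and the output
-- slots of that user's enter/leave events, then scatters the messages into a
-- preallocated output list (objective: alternative decomposition, same O(n)).

-- ===== PORT A =====
-- first loop of A: builds dic_user and li_move together
def aPass1 : List String → PySem.Dict String String → List (Bool × String) →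
    PySem.Dict String String × List (Bool × String)
  | [], d, li => (d, li)
  | s :: rest, d, li =>
    if PySem.Str.pyGet? s 0 = some 'E' then
      match PySem.Str.split₀ s with
      | [_, uid, name] => aPass1 rest (d.insert uid name) (li ++ [(true, uid)])
      | _ => aPass1 rest d li        -- Python raises ValueError here; outside Pre_
    else if PySem.Str.pyGet? s 0 = some 'L' then
      match PySem.Str.split₀ s with
      | [_, uid] => aPass1 rest d (li ++ [(false, uid)])
      | _ => aPass1 rest d li        -- ValueError; outside Pre_
    else if PySem.Str.pyGet? s 0 = some 'C' then
      match PySem.Str.split₀ s with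
      | [_, uid, name] => aPass1 rest (d.insert uid name) li
      | _ => aPass1 rest d li        -- ValueError; outside Pre_
    else aPass1 rest d li

-- second loop of A over li_move (getD "" : KeyError is outside Pre_)
def aPass2 (st : PySem.Dict String String × List (Bool × String)) : List String :=
  st.2.map (fun p =>
    if p.1 then st.1.getD p.2 "" ++ "님이 들어왔습니다."
    else st.1.getD p.2 "" ++ "님이 나갔습니다.")

def solution (record : List String) : List String :=
  aPass2 (aPass1 record PySem.Dict.empty [])

-- ===== PORT B =====
-- B's single grouping pass: per_user maps uid to (final name so far, slots of the
-- user's E/L events); nslots counts emitted messages.  (getD defaults stand for the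
-- Python IndexError / None cases, all outside Pre_.)
def bPass1 : List String → PySem.Dict String (Option String × List (Nat × String)) → Nat →
    PySem.Dict String (Option String × List (Nat × String)) × Nat
  | [], d, n => (d, n)
  | s :: rest, d, n =>
    if PySem.Str.pyGet? s 0 = some 'E' ∨ PySem.Str.pyGet? s 0 = some 'L' ∨
       PySem.Str.pyGet? s 0 = some 'C' then
      let parts := PySem.Str.split₀ s
      let uid := (parts[1]?).getD ""                     -- parts[1]; IndexError outside Pre_
      let ev0 := d.getD uid (none, [])                   -- setdefault(uid, [None, []])
      let ev1 := if PySem.Str.pyGet? s 0 = some 'E' ∨ PySem.Str.pyGet? s 0 = some 'C'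
                 then (some ((parts[2]?).getD ""), ev0.2)  -- ev[0] = parts[2]
                 else ev0
      if PySem.Str.pyGet? s 0 = some 'E' then
        bPass1 rest (d.insert uid (ev1.1, ev1.2 ++ [(n, "님이 들어왔습니다.")])) (n + 1)
      else if PySem.Str.pyGet? s 0 = some 'L' then
        bPass1 rest (d.insert uid (ev1.1, ev1.2 ++ [(n, "님이 나갔습니다.")])) (n + 1)
      else
        bPass1 rest (d.insert uid ev1) n
    else bPass1 rest d n

-- B's scatter: out = [None]*nslots (ported as "" placeholders, all overwritten inside
-- Pre_), then per user fill each slot with name + suffix (name None is outside Pre_).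
def bScatter (st : PySem.Dict String (Option String × List (Nat × String)) × Nat) :
    List String :=
  st.1.items.foldl
    (fun out p => p.2.2.foldl (fun out q => out.set q.1 (p.2.1.getD "" ++ q.2)) out)
    (List.replicate st.2 "")

def solution_alt (record : List String) : List String :=
  bScatter (bPass1 record PySem.Dict.empty 0)

-- ===== PRECONDITION & SPEC =====
-- Pre_ excludes exactly the inputs on which Python A raises: an empty string (IndexError on s[0]),
-- an 'E'/'C' line not splitting into 3 tokens or an 'L' line not splitting into 2 (ValueError on
-- tuple unpacking), and an 'L' line whose uid never appears in any 'E'/'C' line (KeyError).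
def Pre_solution (record : List String) : Prop :=
  ∀ s ∈ record, s ≠ "" ∧
    (PySem.Str.pyGet? s 0 = some 'E' → (PySem.Str.split₀ s).length = 3) ∧
    (PySem.Str.pyGet? s 0 = some 'C' → (PySem.Str.split₀ s).length = 3) ∧
    (PySem.Str.pyGet? s 0 = some 'L' →
      (PySem.Str.split₀ s).length = 2 ∧
      ∃ t ∈ record,
        (PySem.Str.pyGet? t 0 = some 'E' ∨ PySem.Str.pyGet? t 0 = some 'C') ∧
        (PySem.Str.split₀ t).length = 3 ∧
        (PySem.Str.split₀ t)[1]? = (PySem.Str.split₀ s)[1]?)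
instance (record : List String) : Decidable (Pre_solution record) := by
  unfold Pre_solution; infer_instance

def pvWitness_solution : List String :=
  ["Enter uid1 Muzi", "Enter uid2 Prodo", "Leave uid1", "Enter uid1 Prodo", "Change uid2 Ryan"]

def Spec_solution (record : List String) (out : List String) : Prop := out = solution_alt record
instance (record : List String) (out : List String) : Decidable (Spec_solution record out) := by unfold Spec_solution; infer_instance

-- ===== CLAIM (what is proved, stated in full; the proofs are below) =====
def Claim_equal_solution : Prop := ∀ (record : List String), Dom_solution record → Pre_solution record → Spec_solution record (solution record)

-- ===== LEMMAS AND PROOFS =====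

-- spec-level views of a line
def lineHd (s : String) : Option Char := PySem.Str.pyGet? s 0
def uidOf (s : String) : String := ((PySem.Str.split₀ s)[1]?).getD ""
def nameOf (s : String) : String := ((PySem.Str.split₀ s)[2]?).getD ""
def isELC (s : String) : Bool :=
  lineHd s == some 'E' || lineHd s == some 'L' || lineHd s == some 'C'

-- the (uid, message-suffix) event stream of the whole record, in order
def events : List String → List (String × String)
  | [] => []
  | s :: r =>
    if lineHd s = some 'E' then (uidOf s, "님이 들어왔습니다.") :: events r
    else if lineHd s = some 'L' then (uidOf s, "님이 나갔습니다.") :: events r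
    else events r

-- the final uid -> name dictionary
def fdictAux : List String → PySem.Dict String String → PySem.Dict String String
  | [], d => d
  | s :: r, d =>
    fdictAux r (if lineHd s = some 'E' ∨ lineHd s = some 'C'
                then d.insert (uidOf s) (nameOf s) else d)

-- the common specification both ports are proved equal to
def specOut (record : List String) : List String :=
  (events record).map
    (fun e => (fdictAux record PySem.Dict.empty).getD e.1 "" ++ e.2)

-- the per-line arity facts Pre_ supplies
def Good (s : String) : Prop :=
  (lineHd s = some 'E' → (PySem.Str.split₀ s).length = 3) ∧
  (lineHd s = some 'C' → (PySem.Str.split₀ s).length = 3) ∧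
  (lineHd s = some 'L' → (PySem.Str.split₀ s).length = 2)


-- ---------- A-side: solution = specOut (under the arity facts of Pre_) ----------
theorem aPass1_fst (l : List String) (hG : ∀ s ∈ l, Good s) :
    ∀ d li, (aPass1 l d li).1 = fdictAux l d := by
  induction l with
  | nil => intro d li; rfl
  | cons s rest ih =>
    have hs : Good s := hG s (by simp)
    have hr : ∀ t ∈ rest, Good t := fun t ht => hG t (by simp [ht])
    intro d li
    simp only [aPass1, fdictAux]
    split_ifs with h1 h2 h3 <;>
      (try (rcases hsp : PySem.Str.split₀ s with _ | ⟨a, _ | ⟨b, _ | ⟨c, _ | _⟩⟩⟩)) <;>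
      simp_all [ih hr, Good, lineHd, uidOf, nameOf]

def msgA (D : PySem.Dict String String) (p : Bool × String) : String :=
  if p.1 then D.getD p.2 "" ++ "님이 들어왔습니다." else D.getD p.2 "" ++ "님이 나갔습니다."

set_option maxHeartbeats 1000000 in
theorem aPass1_snd (D : PySem.Dict String String) (l : List String)
    (hG : ∀ s ∈ l, Good s) :
    ∀ d li, ((aPass1 l d li).2).map (msgA D)
      = li.map (msgA D) ++ (events l).map (fun e => D.getD e.1 "" ++ e.2) := by
  induction l with
  | nil => intro d li; simp [aPass1, events]
  | cons s rest ih =>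
    have hs : Good s := hG s (by simp)
    have hr : ∀ t ∈ rest, Good t := fun t ht => hG t (by simp [ht])
    intro d li
    simp only [aPass1, events]
    split_ifs with h1 h2 h3 <;>
      (try (rcases hsp : PySem.Str.split₀ s with _ | ⟨a, _ | ⟨b, _ | ⟨c, _ | _⟩⟩⟩)) <;>
      simp_all [ih hr, Good, lineHd, uidOf, msgA]

theorem solution_eq_spec (record : List String) (hG : ∀ s ∈ record, Good s) :
    solution record = specOut record := by
  unfold solution aPass2 specOut
  have h1 := aPass1_fst record hG PySem.Dict.empty []
  have h2 := aPass1_snd (fdictAux record PySem.Dict.empty) record hG PySem.Dict.empty []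
  rw [h1]
  simpa [msgA] using h2

-- ---------- B-side: solution_alt = specOut (unconditionally) ----------
def touched (p : List String) (u : String) : Bool :=
  p.any (fun s => isELC s && (uidOf s == u))

def slotsFrom (u : String) : List (String × String) → Nat → List (Nat × String)
  | [], _ => []
  | e :: r, i => if e.1 = u then (i, e.2) :: slotsFrom u r (i + 1) else slotsFrom u r (i + 1)

def entSpec (p : List String) (u : String) : Option (Option String × List (Nat × String)) :=
  if touched p u then
    some ((fdictAux p PySem.Dict.empty).get? u, slotsFrom u (events p) 0)
  else none

theorem events_append (xs ys : List String) :
    events (xs ++ ys) = events xs ++ events ys := by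
  induction xs with
  | nil => simp [events]
  | cons s r ih => simp only [List.cons_append, events]; split_ifs <;> simp [ih]

theorem fdictAux_append (xs ys : List String) (d : PySem.Dict String String) :
    fdictAux (xs ++ ys) d = fdictAux ys (fdictAux xs d) := by
  induction xs generalizing d with
  | nil => simp [fdictAux]
  | cons s r ih => simp only [List.cons_append, fdictAux]; exact ih _

theorem slotsFrom_append (u : String) (E F : List (String × String)) :
    ∀ i, slotsFrom u (E ++ F) i = slotsFrom u E i ++ slotsFrom u F (i + E.length) := by
  induction E with
  | nil => intro i; simp [slotsFrom]
  | cons e r ih =>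
    intro i
    simp only [List.cons_append, slotsFrom]
    split_ifs <;> simp [ih, Nat.add_assoc, Nat.add_comm 1]

theorem fdict_not_touched (p : List String) (u : String) (h : touched p u = false) :
    ∀ d, (fdictAux p d).get? u = d.get? u := by
  induction p with
  | nil => intro d; rfl
  | cons s r ih =>
    simp only [touched, List.any_cons, Bool.or_eq_false_iff, Bool.and_eq_false_iff,
      beq_eq_false_iff_ne, ne_eq] at h
    intro d
    simp only [fdictAux]
    rw [ih (by simp [touched, h.2])]
    split_ifs with hEC
    · have hE : isELC s = true := by
        rcases hEC with h' | h' <;> simp [isELC, h']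
      have hne : u ≠ uidOf s := by
        rcases h.1 with h' | h'
        · rw [hE] at h'; cases h'
        · exact fun hh => h' (hh ▸ rfl)
      simp [PySem.Dict.get?_insert, hne]
    · rfl

theorem events_not_touched (p : List String) (u : String) (h : touched p u = false) :
    ∀ e ∈ events p, e.1 ≠ u := by
  induction p with
  | nil => simp [events]
  | cons s r ih =>
    simp only [touched, List.any_cons, Bool.or_eq_false_iff, Bool.and_eq_false_iff,
      beq_eq_false_iff_ne, ne_eq] at h
    have hr := ih (by simp [touched, h.2])
    intro e he
    simp only [events] at he
    split_ifs at he with h1 h2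
    · rcases List.mem_cons.mp he with rfl | hm
      · rcases h.1 with h' | h'
        · simp [isELC, h1] at h'
        · exact h'
      · exact hr e hm
    · rcases List.mem_cons.mp he with rfl | hm
      · rcases h.1 with h' | h'
        · simp [isELC, h2] at h'
        · exact h'
      · exact hr e hm
    · exact hr e he

theorem slotsFrom_nil_of_not_mem (u : String) (E : List (String × String))
    (h : ∀ e ∈ E, e.1 ≠ u) : ∀ i, slotsFrom u E i = [] := by
  induction E with
  | nil => intro i; rfl
  | cons e r ih =>
    intro i
    simp only [slotsFrom]
    rw [if_neg (h e (by simp))]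
    exact ih (fun e he => h e (by simp [he])) _

theorem mem_slotsFrom (u : String) (E : List (String × String)) :
    ∀ k i suf, ((i, suf) ∈ slotsFrom u E k ↔ ∃ j, i = k + j ∧ E[j]? = some (u, suf)) := by
  induction E with
  | nil => intro k i suf; simp [slotsFrom]
  | cons e r ih =>
    intro k i suf
    simp only [slotsFrom]
    by_cases h : e.1 = u
    · rw [if_pos h]
      constructor
      · intro hm
        rcases List.mem_cons.mp hm with heq | hm
        · refine ⟨0, by simpa using congrArg Prod.fst heq, ?_⟩
          have : suf = e.2 := congrArg Prod.snd heq
          simp [this, ← h]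
        · rcases (ih (k + 1) i suf).mp hm with ⟨j, hij, hj⟩
          exact ⟨j + 1, by omega, by simpa using hj⟩
      · rintro ⟨j, rfl, hj⟩
        cases j with
        | zero =>
          simp only [List.getElem?_cons_zero, Option.some_inj] at hj
          simp [hj]
        | succ j =>
          exact List.mem_cons_of_mem _ ((ih (k + 1) _ suf).mpr ⟨j, by omega, by simpa using hj⟩)
    · rw [if_neg h]
      constructor
      · intro hm
        rcases (ih (k + 1) i suf).mp hm with ⟨j, hij, hj⟩
        exact ⟨j + 1, by omega, by simpa using hj⟩
      · rintro ⟨j, rfl, hj⟩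
        cases j with
        | zero =>
          simp only [List.getElem?_cons_zero, Option.some_inj] at hj
          exact absurd (congrArg Prod.fst hj) (by simpa using h)
        | succ j =>
          exact (ih (k + 1) _ suf).mpr ⟨j, by omega, by simpa using hj⟩

theorem touched_of_mem_events (p : List String) (e : String × String)
    (h : e ∈ events p) : touched p e.1 = true := by
  induction p with
  | nil => simp [events] at h
  | cons s r ih =>
    simp only [events] at h
    simp only [touched, List.any_cons, Bool.or_eq_true]
    split_ifs at h with h1 h2
    · rcases List.mem_cons.mp h with rfl | hm
      · exact Or.inl (by simp [isELC, h1])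
      · exact Or.inr (ih hm)
    · rcases List.mem_cons.mp h with rfl | hm
      · exact Or.inl (by simp [isELC, h2])
      · exact Or.inr (ih hm)
    · exact Or.inr (ih h)

-- the dict lookup of the grouping state, expressed through entSpec
theorem getD_entSpec (p : List String)
    (d : PySem.Dict String (Option String × List (Nat × String)))
    (hd : ∀ u, d.get? u = entSpec p u) (u : String) :
    d.getD u (none, [])
      = ((fdictAux p PySem.Dict.empty).get? u, slotsFrom u (events p) 0) := by
  rw [PySem.Dict.getD_eq_get?_getD, hd u]
  unfold entSpec
  split_ifs with h
  · rfl
  · have hf : touched p u = false := by simpa using h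
    have h1 := fdict_not_touched p u hf PySem.Dict.empty
    have h2 := slotsFrom_nil_of_not_mem u (events p) (events_not_touched p u hf) 0
    simp [h1, h2, PySem.Dict.get?_empty]

-- one insert step of bPass1 preserves the entSpec description of the state
theorem hd_step (p : List String) (s : String)
    (d : PySem.Dict String (Option String × List (Nat × String)))
    (hd : ∀ u, d.get? u = entSpec p u) (hELC : isELC s = true)
    (nm1 : Option String) (tail : List (Nat × String))
    (hfd1 : (fdictAux (p ++ [s]) PySem.Dict.empty).get? (uidOf s) = nm1)
    (hfdne : ∀ u, u ≠ uidOf s →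
      (fdictAux (p ++ [s]) PySem.Dict.empty).get? u = (fdictAux p PySem.Dict.empty).get? u)
    (hsl1 : slotsFrom (uidOf s) (events (p ++ [s])) 0
      = slotsFrom (uidOf s) (events p) 0 ++ tail)
    (hslne : ∀ u, u ≠ uidOf s →
      slotsFrom u (events (p ++ [s])) 0 = slotsFrom u (events p) 0) :
    ∀ u, (d.insert (uidOf s) (nm1, (d.getD (uidOf s) (none, [])).2 ++ tail)).get? u
      = entSpec (p ++ [s]) u := by
  intro u
  rw [PySem.Dict.get?_insert, getD_entSpec p d hd]
  by_cases hu : u = uidOf s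
  · subst hu
    rw [if_pos rfl]
    unfold entSpec
    rw [if_pos (by
      unfold touched
      rw [List.any_append]
      simp [List.any_cons, hELC])]
    simp [hfd1, hsl1]
  · rw [if_neg hu, hd u]
    unfold entSpec
    have ht : touched (p ++ [s]) u = touched p u := by
      simp [touched, List.any_append]
      intro h1 h2
      exact absurd h2.symm (by simpa using hu)
    rw [ht]
    split_ifs with h
    · simp [hfdne u hu, hslne u hu]
    · rfl

-- a line that is neither E, L nor C changes nothing in the description
theorem entSpec_append_other (p : List String) (s : String)
    (hE : ¬ lineHd s = some 'E') (hL : ¬ lineHd s = some 'L')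
    (hC : ¬ lineHd s = some 'C') :
    ∀ u, entSpec (p ++ [s]) u = entSpec p u := by
  intro u
  unfold entSpec
  have ht : touched (p ++ [s]) u = touched p u := by
    unfold touched
    rw [List.any_append]
    simp [List.any_cons, isELC, hE, hL, hC]
  have hf : fdictAux [s] (fdictAux p PySem.Dict.empty) = fdictAux p PySem.Dict.empty := by
    simp only [fdictAux]
    rw [if_neg (by tauto)]
  have hev : events [s] = [] := by
    simp only [events]
    rw [if_neg hE, if_neg hL]
  rw [ht, fdictAux_append, hf, events_append, hev, List.append_nil]

-- the grouping invariant of bPass1: the state is entSpec of the processed prefix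
theorem bPass1_inv : ∀ (l p : List String)
    (d : PySem.Dict String (Option String × List (Nat × String)))
    (_ : ∀ u, d.get? u = entSpec p u),
    ((bPass1 l d (events p).length).2 = (events (p ++ l)).length) ∧
    (∀ u, (bPass1 l d (events p).length).1.get? u = entSpec (p ++ l) u) := by
  intro l
  induction l with
  | nil =>
    intro p d hd
    exact ⟨by simp [bPass1], fun u => by simpa [bPass1] using hd u⟩
  | cons s rest ih =>
    intro p d hd
    have happ : p ++ s :: rest = (p ++ [s]) ++ rest := by simp
    by_cases hE : PySem.Str.pyGet? s 0 = some 'E'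
    · -- E line
      have hEt : PySem.List.pyGet? s.toList 0 = some 'E' := hE
      have hred : bPass1 (s :: rest) d (events p).length
          = bPass1 rest (d.insert (uidOf s) (some (nameOf s),
              (d.getD (uidOf s) (none, [])).2 ++ [((events p).length, "님이 들어왔습니다.")]))
              ((events p).length + 1) := by
        simp [bPass1, hEt, uidOf, nameOf]
      have hE' : lineHd s = some 'E' := hE
      have hisELC : isELC s = true := by simp [isELC, hE']
      have hev : events (p ++ [s]) = events p ++ [(uidOf s, "님이 들어왔습니다.")] := by
        rw [events_append]; simp [events, hE']
      have hstep := hd_step p s d hd hisELC (some (nameOf s))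
        [((events p).length, "님이 들어왔습니다.")]
        (by rw [fdictAux_append]; simp only [fdictAux, hE']
            simp)
        (by intro u hu
            rw [fdictAux_append]; simp only [fdictAux, hE']
            simp [PySem.Dict.get?_insert, hu])
        (by rw [hev, slotsFrom_append]; simp [slotsFrom])
        (by intro u hu
            rw [hev, slotsFrom_append]
            rw [slotsFrom_nil_of_not_mem u [(uidOf s, "님이 들어왔습니다.")] (by
              rintro e he
              rcases List.mem_singleton.mp he with rfl
              exact fun h => hu h.symm)]
            simp)
      have hres := ih (p ++ [s]) _ hstep
      rw [show (events (p ++ [s])).length = (events p).length + 1 by simp [hev]] at hres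
      rw [happ, hred]
      exact hres
    · by_cases hL : PySem.Str.pyGet? s 0 = some 'L'
      · -- L line
        have hEt : ¬ PySem.List.pyGet? s.toList 0 = some 'E' := hE
        have hLt : PySem.List.pyGet? s.toList 0 = some 'L' := hL
        have hEl : ¬ lineHd s = some 'E' := hE
        have hred : bPass1 (s :: rest) d (events p).length
            = bPass1 rest (d.insert (uidOf s) ((d.getD (uidOf s) (none, [])).1,
                (d.getD (uidOf s) (none, [])).2 ++ [((events p).length, "님이 나갔습니다.")]))
                ((events p).length + 1) := by
          simp [bPass1, hLt, uidOf]
        have hL' : lineHd s = some 'L' := hL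
        have hisELC : isELC s = true := by simp [isELC, hL']
        have hev : events (p ++ [s]) = events p ++ [(uidOf s, "님이 나갔습니다.")] := by
          rw [events_append]; simp [events, hL']
        have hfid : fdictAux [s] (fdictAux p PySem.Dict.empty)
            = fdictAux p PySem.Dict.empty := by
          simp only [fdictAux]
          rw [if_neg (by rintro (h | h) <;> rw [hL'] at h <;> simp at h)]
        have hgd : (d.getD (uidOf s) (none, [])).1
            = (fdictAux p PySem.Dict.empty).get? (uidOf s) := by
          rw [getD_entSpec p d hd]
        have hstep := hd_step p s d hd hisELC
          ((fdictAux p PySem.Dict.empty).get? (uidOf s))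
          [((events p).length, "님이 나갔습니다.")]
          (by rw [fdictAux_append, hfid])
          (by intro u _; rw [fdictAux_append, hfid])
          (by rw [hev, slotsFrom_append]; simp [slotsFrom])
          (by intro u hu
              rw [hev, slotsFrom_append]
              rw [slotsFrom_nil_of_not_mem u [(uidOf s, "님이 나갔습니다.")] (by
                rintro e he
                rcases List.mem_singleton.mp he with rfl
                exact fun h => hu h.symm)]
              simp)
        have hres := ih (p ++ [s]) _ hstep
        rw [show (events (p ++ [s])).length = (events p).length + 1 by simp [hev]] at hres
        rw [happ, hred, hgd]
        exact hres
      · by_cases hC : PySem.Str.pyGet? s 0 = some 'C'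
        · -- C line
          have hEt : ¬ PySem.List.pyGet? s.toList 0 = some 'E' := hE
          have hLt : ¬ PySem.List.pyGet? s.toList 0 = some 'L' := hL
          have hCt : PySem.List.pyGet? s.toList 0 = some 'C' := hC
          have hEl : ¬ lineHd s = some 'E' := hE
          have hLl : ¬ lineHd s = some 'L' := hL
          have hred : bPass1 (s :: rest) d (events p).length
              = bPass1 rest (d.insert (uidOf s) (some (nameOf s),
                  (d.getD (uidOf s) (none, [])).2)) ((events p).length) := by
            simp [bPass1, hCt, uidOf, nameOf]
          have hC' : lineHd s = some 'C' := hC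
          have hisELC : isELC s = true := by simp [isELC, hC']
          have hev : events (p ++ [s]) = events p := by
            rw [events_append]
            have : events [s] = [] := by
              simp only [events]
              rw [if_neg hEl, if_neg hLl]
            simp [this]
          have hstep := hd_step p s d hd hisELC (some (nameOf s)) []
            (by rw [fdictAux_append]; simp only [fdictAux, hC']
                simp)
            (by intro u hu
                rw [fdictAux_append]; simp only [fdictAux, hC']
                simp [PySem.Dict.get?_insert, hu])
            (by rw [hev]; simp)
            (by intro u _; rw [hev])
          have hres := ih (p ++ [s]) _ hstep
          rw [show (events (p ++ [s])).length = (events p).length by rw [hev]] at hres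
          rw [happ, hred]
          simpa using hres
        · -- other line: state unchanged
          have hEt : ¬ PySem.List.pyGet? s.toList 0 = some 'E' := hE
          have hLt : ¬ PySem.List.pyGet? s.toList 0 = some 'L' := hL
          have hCt : ¬ PySem.List.pyGet? s.toList 0 = some 'C' := hC
          have hEl : ¬ lineHd s = some 'E' := hE
          have hLl : ¬ lineHd s = some 'L' := hL
          have hred : bPass1 (s :: rest) d (events p).length
              = bPass1 rest d (events p).length := by
            simp [bPass1, hEt, hLt, hCt]
          have hspec := entSpec_append_other p s hE hL hC
          have hev : events (p ++ [s]) = events p := by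
            rw [events_append]
            have : events [s] = [] := by
              simp only [events]
              rw [if_neg hEl, if_neg hLl]
            simp [this]
          have hres := ih (p ++ [s]) d (fun u => (hd u).trans (hspec u).symm)
          rw [show (events (p ++ [s])).length = (events p).length by rw [hev]] at hres
          rw [happ, hred]
          exact hres


-- keys stay unique through the grouping pass
theorem bPass1_nodup : ∀ (l : List String)
    (d : PySem.Dict String (Option String × List (Nat × String))) (n : Nat),
    d.keys.Nodup → (bPass1 l d n).1.keys.Nodup := by
  intro l
  induction l with
  | nil => intro d n h; exact h
  | cons s rest ih =>
    intro d n h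
    simp only [bPass1]
    split_ifs <;> apply ih <;>
      first
        | exact h
        | exact PySem.Dict.nodup_keys_insert _ _ _ h

-- a fold of set-updates: length, untouched index, uniquely updated index
theorem foldl_set_length : ∀ (ups : List (Nat × String)) (init : List String),
    (ups.foldl (fun o q => o.set q.1 q.2) init).length = init.length := by
  intro ups
  induction ups with
  | nil => intro init; rfl
  | cons q r ih => intro init; simp [List.foldl_cons, ih]

theorem foldl_set_not_mem (i : Nat) : ∀ (ups : List (Nat × String)) (init : List String),
    (∀ q ∈ ups, q.1 ≠ i) →
    (ups.foldl (fun o q => o.set q.1 q.2) init)[i]? = init[i]? := by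
  intro ups
  induction ups with
  | nil => intro init _; rfl
  | cons q r ih =>
    intro init h
    simp only [List.foldl_cons]
    rw [ih _ (fun q hq => h q (by simp [hq])),
      List.getElem?_set_ne (h q (by simp))]

theorem foldl_set_unique (i : Nat) (v : String) : ∀ (ups : List (Nat × String))
    (init : List String), (i, v) ∈ ups → (∀ w, (i, w) ∈ ups → w = v) →
    i < init.length →
    (ups.foldl (fun o q => o.set q.1 q.2) init)[i]? = some v := by
  intro ups
  induction ups with
  | nil => intro init h; simp at h
  | cons q r ih =>
    intro init hm huniq hlen
    simp only [List.foldl_cons]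
    by_cases hq : q.1 = i
    · have hv : q.2 = v := huniq q.2 (by rw [← hq]; simp)
      by_cases hr : ∃ w, (i, w) ∈ r
      · obtain ⟨w, hw⟩ := hr
        have hwv : w = v := huniq w (List.mem_cons_of_mem _ hw)
        subst hwv
        exact ih _ hw (fun w hw => huniq w (List.mem_cons_of_mem _ hw))
          (by simpa [List.length_set] using hlen)
      · rw [not_exists] at hr
        rw [foldl_set_not_mem i r _ (fun p hp h => hr p.2 (by rw [← h]; simpa using hp))]
        rw [hq, hv, List.getElem?_set_self]
        simp [hlen]
    · have hm' : (i, v) ∈ r := by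
        rcases List.mem_cons.mp hm with heq | h
        · exact absurd (congrArg Prod.fst heq).symm hq
        · exact h
      rw [ih _ hm' (fun w hw => huniq w (List.mem_cons_of_mem _ hw))
        (by simpa [List.length_set] using hlen)]

-- nested per-user folds are one fold over the flattened update list
theorem foldl_foldl_eq_flatMap {α β γ : Type} (l : List α) (h : α → List β)
    (g : γ → β → γ) : ∀ (init : γ),
    l.foldl (fun acc x => (h x).foldl g acc) init = (l.flatMap h).foldl g init := by
  induction l with
  | nil => intro init; rfl
  | cons x r ih => intro init; simp only [List.flatMap_cons, List.foldl_append, List.foldl_cons, ih]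

-- the flattened update list of the final grouping state
theorem mem_updates_iff (record : List String)
    (D : PySem.Dict String (Option String × List (Nat × String)))
    (hnd : D.keys.Nodup) (hD : ∀ u, D.get? u = entSpec record u) (i : Nat) (v : String) :
    ((i, v) ∈ D.items.flatMap
        (fun p => p.2.2.map (fun q => (q.1, p.2.1.getD "" ++ q.2)))) ↔
      ∃ u suf, (events record)[i]? = some (u, suf) ∧
        v = ((fdictAux record PySem.Dict.empty).get? u).getD "" ++ suf := by
  constructor
  · rintro hm
    rw [List.mem_flatMap] at hm
    obtain ⟨p, hp, hq⟩ := hm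
    rw [List.mem_map] at hq
    obtain ⟨q, hq, heq⟩ := hq
    have hget : D.get? p.1 = some p.2 := PySem.Dict.get?_of_mem_items _ (by simpa using hp) hnd
    rw [hD p.1] at hget
    unfold entSpec at hget
    split_ifs at hget with ht
    · have hp2 : p.2 = ((fdictAux record PySem.Dict.empty).get? p.1,
          slotsFrom p.1 (events record) 0) := by
        exact (Option.some_inj.mp hget).symm
      have hsl : q ∈ slotsFrom p.1 (events record) 0 := by rw [hp2] at hq; exact hq
      have := (mem_slotsFrom p.1 (events record) 0 q.1 q.2).mp (by simpa using hsl)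
      obtain ⟨j, hij, hj⟩ := this
      refine ⟨p.1, q.2, ?_, ?_⟩
      · have : q.1 = i := congrArg Prod.fst heq
        rw [← this, hij]; simpa using hj
      · have : v = p.2.1.getD "" ++ q.2 := (congrArg Prod.snd heq).symm
        rw [this, hp2]
  · rintro ⟨u, suf, hev, hv⟩
    have hm : (u, suf) ∈ events record := by
      have := List.getElem?_eq_some_iff.mp hev
      obtain ⟨hlt, hg⟩ := this
      exact hg ▸ List.getElem_mem hlt
    have ht : touched record u = true := touched_of_mem_events record (u, suf) hm
    have hget : D.get? u = some ((fdictAux record PySem.Dict.empty).get? u,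
        slotsFrom u (events record) 0) := by
      rw [hD u]; unfold entSpec; rw [if_pos ht]
    rw [List.mem_flatMap]
    refine ⟨(u, ((fdictAux record PySem.Dict.empty).get? u,
      slotsFrom u (events record) 0)), PySem.Dict.mem_items_of_get?_eq_some _ hget, ?_⟩
    rw [List.mem_map]
    refine ⟨(i, suf), (mem_slotsFrom u (events record) 0 i suf).mpr ⟨i, by omega, hev⟩, ?_⟩
    simp [hv]

-- B computes the specification (unconditionally)
theorem solution_alt_eq_spec (record : List String) :
    solution_alt record = specOut record := by
  have hinv := bPass1_inv record [] PySem.Dict.empty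
    (by intro u; simp [entSpec, touched, PySem.Dict.get?_empty])
  rw [List.nil_append] at hinv
  have hN : (bPass1 record PySem.Dict.empty 0).2 = (events record).length := hinv.1
  have hD : ∀ u, (bPass1 record PySem.Dict.empty 0).1.get? u = entSpec record u := hinv.2
  have hnd : (bPass1 record PySem.Dict.empty 0).1.keys.Nodup :=
    bPass1_nodup record _ 0 (by simp [PySem.Dict.keys_empty])
  unfold solution_alt bScatter specOut
  rw [show (fun (out : List String) (p : String × (Option String × List (Nat × String))) =>
        p.2.2.foldl (fun out q => out.set q.1 (p.2.1.getD "" ++ q.2)) out)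
      = (fun out p => ((p.2.2.map (fun q => (q.1, p.2.1.getD "" ++ q.2))).foldl
          (fun o q => o.set q.1 q.2) out)) by
    funext out p
    rw [List.foldl_map]]
  rw [foldl_foldl_eq_flatMap]
  apply List.ext_getElem?
  intro i
  by_cases hi : i < (events record).length
  · obtain ⟨e, he⟩ : ∃ e, (events record)[i]? = some e :=
      ⟨_, List.getElem?_eq_getElem hi⟩
    have hmem := (mem_updates_iff record _ hnd hD i
        (((fdictAux record PySem.Dict.empty).get? e.1).getD "" ++ e.2)).mpr
      ⟨e.1, e.2, by simpa using he, rfl⟩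
    have huniq : ∀ w, (i, w) ∈ (bPass1 record PySem.Dict.empty 0).1.items.flatMap
        (fun p => p.2.2.map (fun q => (q.1, p.2.1.getD "" ++ q.2))) →
        w = ((fdictAux record PySem.Dict.empty).get? e.1).getD "" ++ e.2 := by
      intro w hw
      obtain ⟨u, suf, hev, hv⟩ := (mem_updates_iff record _ hnd hD i w).mp hw
      rw [he] at hev
      obtain rfl : e = (u, suf) := Option.some_inj.mp hev
      exact hv
    rw [foldl_set_unique i _ _ _ hmem huniq
      (by rw [List.length_replicate, hN]; exact hi)]
    rw [List.getElem?_map, he]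
    simp [PySem.Dict.getD_eq_get?_getD]
  · rw [List.getElem?_eq_none (by
      rw [foldl_set_length, List.length_replicate, hN]; omega)]
    rw [List.getElem?_eq_none (by rw [List.length_map]; omega)]

-- ===== VERDICT (by name: the statement is the Claim_ definition above) =====
theorem solution_spec : Claim_equal_solution := by
  intro record _ hpre
  unfold Spec_solution
  rw [solution_alt_eq_spec,
    solution_eq_spec record (fun s hs =>
      ⟨(hpre s hs).2.1, (hpre s hs).2.2.1, fun hL => ((hpre s hs).2.2.2 hL).1⟩)]
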